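-- pv_equiv track=rewrite | github.com/Conner-Beard/advent_of_code_2024 | day9/main.py | compress_memory
-- ===== SOURCE A (Python) =====
-- def compress_memory(memory):
--     """
--     Take the memory text and shift the last element to the first space occuped
--     by None until there are no None spaces left
--     Args:
--         memory (list of int and None): the expanded memory space described in
--         the disk_map
--
--     Returns:
--         a compressed version of the memory space following the problem algo
--     """
--     while None in memory:
--         last_value = memory.pop()
--         if last_value is not None:
--             for index, value in enumerate(memory):
--                 if value is None:
--                     memory[index] = last_value
--                     break
--     return memory
-- ===== SOURCE B (Python) =====
-- def compress_memory(memory):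
--     # Single pass: keep the first k slots (k = number of non-None values),
--     # filling each None gap from a stream of the trailing values taken right-to-left.
--     # Mutates `memory` in place (like A) and returns it.
--     keep = sum(1 for v in memory if v is not None)
--     it = iter([v for v in reversed(memory) if v is not None])
--     memory[:] = [v if v is not None else next(it) for v in memory[:keep]]
--     return memory
-- ===== Notes on version B (the rewrite author's own statement) =====
-- stated objective: faster
-- what changed: Replaces A's repeated pop-and-scan-for-first-None loop with a single pass that keeps the first k slots (k = count of non-None values) and fills each None gap from the reversed stream of values.
import Mathlib
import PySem

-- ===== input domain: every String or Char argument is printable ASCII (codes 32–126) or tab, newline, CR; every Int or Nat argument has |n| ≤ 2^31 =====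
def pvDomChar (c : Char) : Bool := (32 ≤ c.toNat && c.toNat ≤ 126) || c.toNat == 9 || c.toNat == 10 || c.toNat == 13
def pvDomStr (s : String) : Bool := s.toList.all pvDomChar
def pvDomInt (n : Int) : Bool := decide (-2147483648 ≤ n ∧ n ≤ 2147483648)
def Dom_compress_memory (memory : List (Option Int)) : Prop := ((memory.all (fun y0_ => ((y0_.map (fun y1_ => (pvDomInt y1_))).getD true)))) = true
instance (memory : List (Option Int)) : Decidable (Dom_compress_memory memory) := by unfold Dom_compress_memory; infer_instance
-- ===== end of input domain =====

-- B changes the algorithm: one pass computing the kept prefix and filling gaps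
-- from the reversed stream of values, instead of A's repeated pop + scan-for-first-None
-- (quadratic) loop.  Both A and B mutate `memory` in place in Python; the theorem
-- is about the (identical) return value.

-- ===== PORT A =====
-- the inner `for index, value in enumerate(memory): if value is None: memory[index] = last; break`
def fillFirstA : List (Option Int) → Int → List (Option Int)
  | [], _ => []
  | none :: xs, v => some v :: xs
  | x :: xs, v => x :: fillFirstA xs v

theorem fillFirstA_length (xs : List (Option Int)) (v : Int) :
    (fillFirstA xs v).length = xs.length := by
  induction xs with
  | nil => rfl
  | cons x xs ih => cases x <;> simp [fillFirstA, ih]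

def compress_memory (memory : List (Option Int)) : List (Option Int) :=
  if none ∈ memory then
    -- memory.pop(): split into dropLast and getLast (memory is nonempty here)
    match h : memory.getLast? with
    | some (some v) => compress_memory (fillFirstA memory.dropLast v)
    | some none => compress_memory memory.dropLast
    | none => memory  -- unreachable: none ∈ memory forces memory ≠ []
  else memory
termination_by memory.length
decreasing_by
  · have hne : memory ≠ [] := by rintro rfl; simp at h
    have hpos := List.length_pos_of_ne_nil hne
    rw [fillFirstA_length, List.length_dropLast]; omega
  · have hne : memory ≠ [] := by rintro rfl; simp at h
    have hpos := List.length_pos_of_ne_nil hne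
    rw [List.length_dropLast]; omega

-- ===== PORT B =====
-- the list comprehension `[v if v is not None else next(it) for v in memory[:keep]]`
def fillB : List (Option Int) → List (Option Int) → List (Option Int)
  | [], _ => []
  | some v :: xs, t => some v :: fillB xs t
  | none :: xs, y :: t => y :: fillB xs t
  | none :: _, [] => []  -- unreachable: the stream always has enough values

def compress_memory_alt (memory : List (Option Int)) : List (Option Int) :=
  let keep := (memory.filter Option.isSome).length
  let tail := memory.reverse.filter Option.isSome
  fillB (memory.take keep) tail

-- ===== PRECONDITION & SPEC =====
def Spec_compress_memory (memory : List (Option Int)) (out : List (Option Int)) : Prop := out = compress_memory_alt memory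
instance (memory : List (Option Int)) (out : List (Option Int)) : Decidable (Spec_compress_memory memory out) := by unfold Spec_compress_memory; infer_instance

-- ===== CLAIM (what is proved, stated in full; the proofs are below) =====
def Claim_equal_compress_memory : Prop := ∀ (memory : List (Option Int)), Dom_compress_memory memory → Spec_compress_memory memory (compress_memory memory)

-- ===== LEMMAS AND PROOFS =====

theorem fillB_all_some (xs t : List (Option Int)) (h : none ∉ xs) : fillB xs t = xs := by
  induction xs generalizing t with
  | nil => rfl
  | cons x xs ih =>
    cases x with
    | none => simp at h
    | some v => simp at h; simp [fillB, ih _ h]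

theorem fillB_append_some (p xs t : List (Option Int)) (h : none ∉ p) :
    fillB (p ++ xs) t = p ++ fillB xs t := by
  induction p with
  | nil => rfl
  | cons x p ih =>
    cases x with
    | none => simp at h
    | some v => simp at h; simp [fillB, ih h]

-- only the first (count of Nones) stream elements matter
theorem fillB_tail_irrel (xs t u u' : List (Option Int))
    (h : xs.count none ≤ t.length) : fillB xs (t ++ u) = fillB xs (t ++ u') := by
  induction xs generalizing t with
  | nil => rfl
  | cons x xs ih =>
    cases x with
    | some v =>
      have : xs.count none ≤ t.length := by
        simpa using h
      simp [fillB, ih _ this]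
    | none =>
      cases t with
      | nil => simp at h
      | cons y t =>
        have : xs.count none ≤ t.length := by
          simp at h; omega
        simp [fillB, ih _ this]

theorem mem_none_split (ys : List (Option Int)) (h : none ∈ ys) :
    ∃ p s, ys = p ++ none :: s ∧ none ∉ p := by
  induction ys with
  | nil => simp at h
  | cons x xs ih =>
    cases x with
    | none => exact ⟨[], xs, rfl, by simp⟩
    | some v =>
      simp at h
      obtain ⟨p, s, rfl, hp⟩ := ih h
      exact ⟨some v :: p, s, rfl, by simp [hp]⟩

theorem fillFirstA_split (p s : List (Option Int)) (v : Int) (hp : none ∉ p) :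
    fillFirstA (p ++ none :: s) v = p ++ some v :: s := by
  induction p with
  | nil => rfl
  | cons x p ih =>
    cases x with
    | none => simp at hp
    | some w => simp at hp; simp [fillFirstA, ih hp]

theorem filter_isSome_eq_self (p : List (Option Int)) (hp : none ∉ p) :
    p.filter Option.isSome = p := by
  apply List.filter_eq_self.2
  intro a ha
  cases a with
  | none => exact absurd ha hp
  | some v => rfl

theorem countSome_le_length (xs : List (Option Int)) :
    (xs.filter Option.isSome).length ≤ xs.length := List.length_filter_le _ _

-- unfolding of B's definition
theorem alt_def (m : List (Option Int)) :
    compress_memory_alt m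
    = fillB (m.take (m.filter Option.isSome).length) (m.reverse.filter Option.isSome) := rfl

-- B commutes with A's step "replace first None by the popped last value"
theorem alt_step (p s : List (Option Int)) (v : Int) (hp : none ∉ p) :
    compress_memory_alt (p ++ none :: s ++ [some v]) =
    compress_memory_alt (p ++ some v :: s) := by
  rw [alt_def, alt_def]
  have hps := filter_isSome_eq_self p hp
  have hrev : (p.reverse.filter Option.isSome) = p.reverse :=
    filter_isSome_eq_self _ (by simpa using hp)
  set ks := (s.filter Option.isSome).length with hks
  have hks_le : ks ≤ s.length := countSome_le_length s
  have hkeep1 : ((p ++ none :: s ++ [some v]).filter Option.isSome).length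
      = p.length + (ks + 1) := by
    simp [List.filter_append, hps, ← hks, Option.isSome]
  have hkeep2 : ((p ++ some v :: s).filter Option.isSome).length
      = p.length + (ks + 1) := by
    simp [List.filter_append, hps, ← hks, Option.isSome]
  have h2 : p.length + (ks + 1) - p.length = ks + 1 := by omega
  have htake1 : (p ++ none :: s ++ [some v]).take (p.length + (ks + 1))
      = p ++ none :: s.take ks := by
    rw [List.take_append_of_le_length (by simp; omega), List.take_append,
      List.take_of_length_le (by omega), h2, List.take_succ_cons]
  have htake2 : (p ++ some v :: s).take (p.length + (ks + 1))
      = p ++ some v :: s.take ks := by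
    rw [List.take_append, List.take_of_length_le (by omega), h2, List.take_succ_cons]
  have hrev1 : ((p ++ none :: s ++ [some v]).reverse.filter Option.isSome)
      = some v :: (s.reverse.filter Option.isSome ++ p.reverse) := by
    simp [List.reverse_append, List.filter_append, hrev, Option.isSome]
  have hrev2 : ((p ++ some v :: s).reverse.filter Option.isSome)
      = s.reverse.filter Option.isSome ++ some v :: p.reverse := by
    simp [List.reverse_append, List.filter_append, hrev, Option.isSome]
  rw [hkeep1, hkeep2, htake1, htake2, hrev1, hrev2]
  rw [fillB_append_some _ _ _ hp, fillB_append_some _ _ _ hp]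
  have hcount : (s.take ks).count none ≤ (s.reverse.filter Option.isSome).length := by
    have h1 : (s.take ks).count none ≤ (s.take ks).length := List.count_le_length
    have h2 : (s.take ks).length ≤ ks := by simp
    have h3 : (s.reverse.filter Option.isSome).length = ks := by
      simp [List.filter_reverse, ← hks]
    omega
  have h4 := fillB_tail_irrel (s.take ks) (s.reverse.filter Option.isSome)
      p.reverse (some v :: p.reverse) hcount
  simp only [List.filter_reverse] at h4
  simp [fillB, h4]

theorem alt_drop_none (ys : List (Option Int)) :
    compress_memory_alt (ys ++ [none]) = compress_memory_alt ys := by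
  rw [alt_def, alt_def]
  have hk : ((ys ++ [none]).filter Option.isSome).length
      = (ys.filter Option.isSome).length := by
    simp [List.filter_append, Option.isSome]
  rw [hk, List.take_append_of_le_length (countSome_le_length ys)]
  have hr : ((ys ++ [none]).reverse.filter Option.isSome)
      = ys.reverse.filter Option.isSome := by
    simp [List.reverse_append, Option.isSome]
  rw [hr]

theorem alt_no_none (m : List (Option Int)) (h : none ∉ m) :
    compress_memory_alt m = m := by
  rw [alt_def, filter_isSome_eq_self m h, List.take_length]
  exact fillB_all_some m _ h

theorem main_eq : ∀ n (m : List (Option Int)), m.length = n →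
    compress_memory m = compress_memory_alt m := by
  intro n
  induction n using Nat.strong_induction_on with
  | _ n ih =>
    intro m hlen
    rw [compress_memory]
    by_cases hmem : none ∈ m
    · have hne : m ≠ [] := by rintro rfl; simp at hmem
      have hpos := List.length_pos_of_ne_nil hne
      have hgl : m.getLast? = some (m.getLast hne) := List.getLast?_eq_some_getLast hne
      have hdecomp : m.dropLast ++ [m.getLast hne] = m := List.dropLast_append_getLast hne
      have hdl : m.dropLast.length < n := by
        rw [List.length_dropLast]; omega
      simp only [hmem, if_pos]
      split
      next v heq =>
        have hlast : m.getLast hne = some v := by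
          rw [hgl] at heq; exact Option.some.inj heq
        have hmem' : none ∈ m.dropLast := by
          have hm2 := hmem
          conv at hm2 => rw [← hdecomp, hlast]
          simp at hm2
          exact hm2
        obtain ⟨p, s, hps, hp⟩ := mem_none_split _ hmem'
        rw [hps, fillFirstA_split _ _ _ hp]
        have hlen2 : (p ++ some v :: s).length < n := by
          have h5 : (p ++ some v :: s).length = m.dropLast.length := by
            rw [hps]; simp
          omega
        rw [ih _ hlen2 _ rfl]
        have : compress_memory_alt m = compress_memory_alt (p ++ some v :: s) := by
          conv_lhs => rw [← hdecomp, hlast, hps]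
          simpa using alt_step p s v hp
        rw [this]
      next heq =>
        have hlast : m.getLast hne = none := by
          rw [hgl] at heq; exact Option.some.inj heq
        rw [ih _ hdl _ rfl]
        have : compress_memory_alt m = compress_memory_alt m.dropLast := by
          conv_lhs => rw [← hdecomp, hlast]
          exact alt_drop_none _
        rw [this]
      next heq => rw [hgl] at heq; cases heq
    · simp only [hmem, if_neg, not_false_iff]
      exact (alt_no_none m hmem).symm

-- ===== VERDICT (by name: the statement is the Claim_ definition above) =====
theorem compress_memory_spec : Claim_equal_compress_memory := by
  intro m _
  unfold Spec_compress_memory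
  exact main_eq m.length m rfl
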